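-- pv_equiv track=rewrite | github.com/bartoszgebarowski/inventory-management | run.py | check_keys_for_duplicates
-- ===== SOURCE A (Python) =====
-- def check_keys_for_duplicates(keys_candidate) -> bool:
--     """
--     Functions that will check if data sorting keys are unique
--     """
--     compare_keys = []
--     for key in keys_candidate:
--         compare_keys.append(key.lower())
--
--     if len(compare_keys) == len(set(compare_keys)) and len(compare_keys) >= 1:
--         return True
--     else:
--         return False
-- ===== SOURCE B (Python) =====
-- def check_keys_for_duplicates(keys_candidate) -> bool:
--     """
--     Functions that will check if data sorting keys are unique
--     """
--     lowered = sorted(key.lower() for key in keys_candidate)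
--     if not lowered:
--         return False
--     prev = lowered[0]
--     for cur in lowered[1:]:
--         if cur == prev:
--             return False
--         prev = cur
--     return True
-- ===== Notes on version B (the rewrite author's own statement) =====
-- stated objective: alternative
-- what changed: Replaces the build-a-set-and-compare-lengths duplicate test with sort-then-adjacent-scan over the lowered keys, with early exit at the first adjacent duplicate.
import Mathlib
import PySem

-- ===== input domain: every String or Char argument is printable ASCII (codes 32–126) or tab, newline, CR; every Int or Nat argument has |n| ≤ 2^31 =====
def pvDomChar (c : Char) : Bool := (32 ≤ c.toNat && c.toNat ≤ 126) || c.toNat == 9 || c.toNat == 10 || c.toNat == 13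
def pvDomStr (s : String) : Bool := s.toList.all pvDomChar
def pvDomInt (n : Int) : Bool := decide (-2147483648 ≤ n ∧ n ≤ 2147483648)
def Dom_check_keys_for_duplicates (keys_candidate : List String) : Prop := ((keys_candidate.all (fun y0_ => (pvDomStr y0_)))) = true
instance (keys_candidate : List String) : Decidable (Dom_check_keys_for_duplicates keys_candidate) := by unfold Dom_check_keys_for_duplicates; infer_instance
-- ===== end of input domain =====

-- B replaces A's set-size-comparison duplicate test by sorting the lowered keys and scanning once
-- for an adjacent equal pair (alternative algorithm, same result).


-- ===== PORT A =====
def check_keys_for_duplicates (keys_candidate : List String) : Bool :=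
  let compare_keys :=
    keys_candidate.foldl (fun acc key => acc ++ [PySem.Str.lower key]) ([] : List String)
  if compare_keys.length = (PySem.Set.ofList compare_keys).length ∧ 1 ≤ compare_keys.length
  then true else false

-- ===== PORT B =====
-- the 'prev/cur' early-exit scan of Source B
def pvScan (prev : String) : List String → Bool
  | [] => true
  | cur :: rest => if cur == prev then false else pvScan cur rest

def check_keys_for_duplicates_alt (keys_candidate : List String) : Bool :=
  let lowered :=
    PySem.List.sorted (keys_candidate.map PySem.Str.lower) (fun x => x) false
  match lowered with
  | [] => false
  | p :: rest => pvScan p rest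

-- ===== PRECONDITION & SPEC =====
def Spec_check_keys_for_duplicates (keys_candidate : List String) (out : Bool) : Prop := out = check_keys_for_duplicates_alt keys_candidate
instance (keys_candidate : List String) (out : Bool) : Decidable (Spec_check_keys_for_duplicates keys_candidate out) := by unfold Spec_check_keys_for_duplicates; infer_instance

-- ===== CLAIM (what is proved, stated in full; the proofs are below) =====
def Claim_equal_check_keys_for_duplicates : Prop := ∀ (keys_candidate : List String), Dom_check_keys_for_duplicates keys_candidate → Spec_check_keys_for_duplicates keys_candidate (check_keys_for_duplicates keys_candidate)

-- ===== LEMMAS AND PROOFS =====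

-- A's append loop builds the map of Str.lower
theorem pv_foldl_eq_map (keys : List String) :
    keys.foldl (fun acc key => acc ++ [PySem.Str.lower key]) ([] : List String)
      = keys.map PySem.Str.lower := by
  rw [PySem.List.foldl_append_eq_flatMap]
  induction keys with
  | nil => rfl
  | cons k ks ih => simp [List.flatMap_cons] at ih ⊢; exact ih

theorem pv_ofList_sublist {α : Type} [DecidableEq α] (xs : List α) :
    (PySem.Set.ofList xs).Sublist xs := by
  induction xs with
  | nil => simp [PySem.Set.ofList_nil]
  | cons x xs ih =>
    rw [PySem.Set.ofList_cons]
    refine List.Sublist.cons₂ x (List.Sublist.trans ?_ ih)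
    simp only [PySem.Set.discard]
    exact List.filter_sublist

theorem pv_len_eq_iff_nodup {α : Type} [DecidableEq α] (xs : List α) :
    xs.length = (PySem.Set.ofList xs).length ↔ xs.Nodup := by
  constructor
  · intro h
    have := (pv_ofList_sublist xs).eq_of_length h.symm
    rw [← this]; exact PySem.Set.nodup_ofList xs
  · intro h
    rw [PySem.Set.ofList_eq_self_of_nodup xs h]

theorem pv_scan_iff (rest : List String) :
    ∀ p : String, (p :: rest).Pairwise (· ≤ ·) →
      (pvScan p rest = true ↔ (p :: rest).Nodup) := by
  induction rest with
  | nil => intro p _; simp [pvScan]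
  | cons c t ih =>
    intro p h
    have hpc : p ≤ c := by
      have := (List.pairwise_cons.mp h).1
      exact this c (by simp)
    have h' : (c :: t).Pairwise (· ≤ ·) := (List.pairwise_cons.mp h).2
    by_cases hc : c = p
    · subst hc
      simp [pvScan]
    · have hne : (c == p) = false := by simp [hc]
      have hct : ∀ y ∈ t, c ≤ y := fun y hy =>
        (List.pairwise_cons.mp h').1 y hy
      have hpt : ∀ y ∈ t, p ≠ y := by
        intro y hy hpy
        have : p < c := lt_of_le_of_ne hpc (fun e => hc e.symm)
        exact absurd (hpy ▸ (hct y hy)) (not_le_of_gt this)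
      rw [show pvScan p (c :: t) = pvScan c t by simp [pvScan, hne]]
      rw [ih c h']
      constructor
      · intro hn
        refine List.nodup_cons.mpr ⟨?_, hn⟩
        intro hm
        rcases List.mem_cons.mp hm with e | e
        · exact hc e.symm
        · exact hpt p e rfl
      · intro hn
        exact (List.nodup_cons.mp hn).2

theorem pv_alt_iff (keys : List String) :
    check_keys_for_duplicates_alt keys = true ↔
      (keys.map PySem.Str.lower) ≠ [] ∧ (keys.map PySem.Str.lower).Nodup := by
  unfold check_keys_for_duplicates_alt
  set l := keys.map PySem.Str.lower with hl
  have hperm := PySem.List.sorted_perm l (fun x => x) false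
  have hpw := PySem.List.sorted_pairwise l (fun x => x)
  cases hs : PySem.List.sorted l (fun x => x) false with
  | nil =>
    have : l = [] := (PySem.List.sorted_eq_nil_iff l _ _).mp hs
    simp [this]
  | cons p rest =>
    have hne : l ≠ [] := by
      intro e
      rw [e] at hs
      simp [(PySem.List.sorted_eq_nil_iff ([] : List String) (fun x => x) false).mpr rfl] at hs
    rw [hs] at hperm hpw
    rw [pv_scan_iff rest p hpw]
    constructor
    · intro hn; exact ⟨hne, hperm.nodup_iff.mp hn⟩
    · intro ⟨_, hn⟩; exact hperm.nodup_iff.mpr hn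

-- ===== VERDICT (by name: the statement is the Claim_ definition above) =====
theorem check_keys_for_duplicates_spec : Claim_equal_check_keys_for_duplicates := by
  intro keys _
  unfold Spec_check_keys_for_duplicates check_keys_for_duplicates
  simp only [pv_foldl_eq_map]
  set l := keys.map PySem.Str.lower with hl
  by_cases h : l.length = (PySem.Set.ofList l).length ∧ 1 ≤ l.length
  · rw [if_pos h]
    refine ((pv_alt_iff keys).mpr ⟨?_, (pv_len_eq_iff_nodup l).mp h.1⟩).symm
    show l ≠ []
    intro e; rw [e] at h; simp at h
  · rw [if_neg h]
    symm
    rw [Bool.eq_false_iff]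
    intro hb
    rcases (pv_alt_iff keys).mp hb with ⟨hne, hn⟩
    refine h ⟨(pv_len_eq_iff_nodup l).mpr hn, ?_⟩
    exact List.length_pos_of_ne_nil hne
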